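-- pv_equiv track=rewrite | github.com/olzkh/alita-sdk | alita_sdk/tools/carrier/utils/utils.py | exclude_from_dict
-- ===== SOURCE A (Python) =====
-- def exclude_from_dict(data: dict, keys_to_exclude_str: str) -> dict:
--     """Removes keys from a dictionary if they contain any of the substrings."""
--     if not keys_to_exclude_str:
--         return data
--     exclude_substrings = list(filter(None, keys_to_exclude_str.split(',')))
--
--     filtered_data = data.copy()
--     for sub in exclude_substrings:
--         filtered_data = {k: v for k, v in filtered_data.items() if sub not in k}
--     return filtered_data
-- ===== SOURCE B (Python) =====
-- def exclude_from_dict(data: dict, keys_to_exclude_str: str) -> dict: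
--     """Removes keys from a dictionary if they contain any of the substrings."""
--     if not keys_to_exclude_str:
--         return data
--     subs = [s for s in keys_to_exclude_str.split(',') if s]
--     out = {}
--     for k, v in data.items():
--         for sub in subs:
--             if sub in k:
--                 break
--         else:
--             out[k] = v
--     return out
-- ===== Notes on version B (the rewrite author's own statement) =====
-- stated objective: simpler
-- what changed: A rebuilds the whole dict once per exclude-substring (one scan and copy per substring); B makes a single explicit pass over the items, testing the substrings per key with an inner break/else loop and appending kept pairs to one accumulator dict.
import Mathlib
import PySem

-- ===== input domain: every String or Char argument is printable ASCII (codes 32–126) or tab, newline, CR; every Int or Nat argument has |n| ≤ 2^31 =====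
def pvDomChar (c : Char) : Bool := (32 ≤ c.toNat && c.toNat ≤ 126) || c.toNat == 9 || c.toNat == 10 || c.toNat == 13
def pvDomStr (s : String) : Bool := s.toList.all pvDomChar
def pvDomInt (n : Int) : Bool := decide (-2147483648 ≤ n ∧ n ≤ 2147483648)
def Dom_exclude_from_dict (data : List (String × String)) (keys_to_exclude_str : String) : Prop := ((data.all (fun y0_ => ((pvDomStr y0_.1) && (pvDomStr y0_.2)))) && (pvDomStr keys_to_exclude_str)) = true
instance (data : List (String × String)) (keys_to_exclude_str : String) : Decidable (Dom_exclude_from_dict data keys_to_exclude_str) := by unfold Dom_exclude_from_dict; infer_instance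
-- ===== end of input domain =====

-- B replaces A's per-substring dict-rebuild loop with one explicit pass over the
-- items, an inner break/else loop per key, and a single accumulator (objective: simpler).

-- ===== PORT A =====
def exclude_from_dict (data : List (String × String)) (keys_to_exclude_str : String) : List (String × String) :=
  if keys_to_exclude_str = "" then data
  else
    let exclude_substrings := ((PySem.Str.split? keys_to_exclude_str ",").getD []).filter (fun x => x != "")
    -- for sub in exclude_substrings: filtered_data = {k: v for ... if sub not in k}
    exclude_substrings.foldl
      (fun filtered_data sub => filtered_data.filter (fun kv => !(PySem.Str.isIn sub kv.1)))
      data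

-- ===== PORT B =====
-- inner 'for sub in subs: if sub in k: break / else:' loop of Source B
def pvHits (k : String) : List String → Bool
  | [] => false
  | sub :: rest => if PySem.Str.isIn sub k then true else pvHits k rest

-- outer 'for k, v in data.items(): … out[k] = v' loop of Source B (keys are distinct, so
-- appending kept pairs in order is exactly the dict built by out[k] = v)
def pvKeepGo (subs : List String) : List (String × String) → List (String × String)
  | [] => []
  | (k, v) :: rest => if pvHits k subs then pvKeepGo subs rest else (k, v) :: pvKeepGo subs rest

def exclude_from_dict_alt (data : List (String × String)) (keys_to_exclude_str : String) : List (String × String) :=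
  if keys_to_exclude_str = "" then data
  else
    pvKeepGo (((PySem.Str.split? keys_to_exclude_str ",").getD []).filter (fun s => s != "")) data

-- ===== PRECONDITION & SPEC =====
def Spec_exclude_from_dict (data : List (String × String)) (keys_to_exclude_str : String) (out : List (String × String)) : Prop := out = exclude_from_dict_alt data keys_to_exclude_str
instance (data : List (String × String)) (keys_to_exclude_str : String) (out : List (String × String)) : Decidable (Spec_exclude_from_dict data keys_to_exclude_str out) := by unfold Spec_exclude_from_dict; infer_instance

-- ===== CLAIM (what is proved, stated in full; the proofs are below) =====
def Claim_equal_exclude_from_dict : Prop := ∀ (data : List (String × String)) (keys_to_exclude_str : String), Dom_exclude_from_dict data keys_to_exclude_str → Spec_exclude_from_dict data keys_to_exclude_str (exclude_from_dict data keys_to_exclude_str)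

-- ===== LEMMAS AND PROOFS =====

-- pvHits is List.any of the membership test
theorem pvHits_eq_any (k : String) (subs : List String) :
    pvHits k subs = subs.any (fun sub => PySem.Str.isIn sub k) := by
  induction subs with
  | nil => rfl
  | cons s rest ih =>
      simp only [pvHits, ih, List.any_cons]
      cases PySem.Str.isIn s k <;> simp

-- pvKeepGo is a filter by "no substring hits"
theorem pvKeepGo_eq_filter (subs : List String) (data : List (String × String)) :
    pvKeepGo subs data = data.filter (fun kv => !pvHits kv.1 subs) := by
  induction data with
  | nil => rfl
  | cons kv rest ih =>
      obtain ⟨k, v⟩ := kv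
      simp only [pvKeepGo, ih, List.filter_cons]
      cases h : pvHits k subs <;> simp

-- A's fold of one filter per substring equals one filter testing all substrings.
theorem foldl_filter_eq_filter_all {α : Type} (subs : List String)
    (p : String → α → Bool) (data : List α) :
    subs.foldl (fun acc sub => acc.filter (fun kv => !(p sub kv))) data
      = data.filter (fun kv => !(subs.any (fun sub => p sub kv))) := by
  induction subs generalizing data with
  | nil => simp
  | cons s rest ih =>
      simp only [List.foldl_cons, ih, List.filter_filter]
      apply List.filter_congr
      intro kv _
      simp only [List.any_cons]
      cases p s kv <;> simp

-- ===== VERDICT (by name: the statement is the Claim_ definition above) =====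
theorem exclude_from_dict_spec : Claim_equal_exclude_from_dict := by
  intro data keys _
  unfold Spec_exclude_from_dict exclude_from_dict exclude_from_dict_alt
  split
  · rfl
  · rw [foldl_filter_eq_filter_all, pvKeepGo_eq_filter]
    simp [pvHits_eq_any]
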